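-- pv_equiv track=rewrite | github.com/blooroot/uni-notes | notes/cicloV/DataStructures/week 9/labTime/Bag/bagVersion2.py | greedy_max_weight_descendent
-- ===== SOURCE A (Python) =====
-- def greedy_max_weight_descendent(weight, capacity):
--     # Ordenamos el array de weights
--     sorted_weights = sorted(weights, reverse = True)
--     # Inicialmente
--     total_weight = 0
--     # Vamos agregando los objetos m치s pesados
--     for weight in sorted_weights:
--         if total_weight + weight <= capacity:
--             total_weight += weight
--         else:
--             break
--
--     return total_weight
--
-- weights = [2, 3, 5, 7, 1, 4, 1]
-- ===== SOURCE B (Python) =====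
-- weights = [2, 3, 5, 7, 1, 4, 1]
--
-- def greedy_max_weight_descendent(weight, capacity):
--     # Selection by repeated max: no up-front full sort; stop at the first
--     # remaining maximum that does not fit.
--     remaining = list(weights)
--     total_weight = 0
--     while remaining:
--         w = max(remaining)
--         if total_weight + w > capacity:
--             break
--         total_weight += w
--         remaining.remove(w)
--     return total_weight
-- ===== Notes on version B (the rewrite author's own statement) =====
-- stated objective: alternative
-- what changed: Replaces the full descending sort + for/break loop with a selection loop that repeatedly takes max() of the remaining items and removes it, stopping at the first maximum that does not fit.
import Mathlib
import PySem

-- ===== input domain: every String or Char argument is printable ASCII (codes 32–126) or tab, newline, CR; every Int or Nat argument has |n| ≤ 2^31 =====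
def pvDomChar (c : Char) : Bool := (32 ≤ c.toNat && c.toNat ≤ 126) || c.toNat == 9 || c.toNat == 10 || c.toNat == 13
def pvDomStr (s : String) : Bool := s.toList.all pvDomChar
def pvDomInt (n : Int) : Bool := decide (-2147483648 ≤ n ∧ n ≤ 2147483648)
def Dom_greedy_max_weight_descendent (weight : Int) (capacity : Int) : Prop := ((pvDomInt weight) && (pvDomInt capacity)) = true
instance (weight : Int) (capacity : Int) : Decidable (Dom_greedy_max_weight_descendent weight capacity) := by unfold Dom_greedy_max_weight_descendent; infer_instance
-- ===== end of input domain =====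

-- B replaces A's full descending sort + for/break loop by a selection loop
-- (repeatedly take max() of the remaining items, remove it, stop at the first
-- maximum that does not fit); same return value, 'weight' unused as in A.

-- ===== PORT A =====
-- module-level constant `weights`
def pvWeights : List Int := [2, 3, 5, 7, 1, 4, 1]

-- the for/break loop over sorted_weights
def pvLoopA : List Int → Int → Int → Int
  | [], total_weight, _ => total_weight
  | w :: rest, total_weight, capacity =>
    if total_weight + w ≤ capacity then pvLoopA rest (total_weight + w) capacity
    else total_weight

def greedy_max_weight_descendent (weight : Int) (capacity : Int) : Int :=
  let sorted_weights := PySem.List.sorted pvWeights (fun w => w) true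
  pvLoopA sorted_weights 0 capacity

-- ===== PORT B =====
-- the while loop: fuel is the length of `remaining` (each pass removes one element)
def pvLoopB : Nat → List Int → Int → Int → Int
  | 0, _, total_weight, _ => total_weight
  | fuel + 1, remaining, total_weight, capacity =>
    match PySem.List.max? remaining (fun w => w) with
    | none => total_weight       -- `while remaining:` exits on the empty list
    | some w =>
      if total_weight + w > capacity then total_weight
      else pvLoopB fuel ((PySem.List.remove? remaining w).getD remaining)
             (total_weight + w) capacity

def greedy_max_weight_descendent_alt (weight : Int) (capacity : Int) : Int :=
  pvLoopB pvWeights.length pvWeights 0 capacity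

-- ===== PRECONDITION & SPEC =====
def Spec_greedy_max_weight_descendent (weight : Int) (capacity : Int) (out : Int) : Prop := out = greedy_max_weight_descendent_alt weight capacity
instance (weight : Int) (capacity : Int) (out : Int) : Decidable (Spec_greedy_max_weight_descendent weight capacity out) := by unfold Spec_greedy_max_weight_descendent; infer_instance

-- ===== CLAIM (what is proved, stated in full; the proofs are below) =====
def Claim_equal_greedy_max_weight_descendent : Prop := ∀ (weight : Int) (capacity : Int), Dom_greedy_max_weight_descendent weight capacity → Spec_greedy_max_weight_descendent weight capacity (greedy_max_weight_descendent weight capacity)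

-- ===== LEMMAS AND PROOFS =====

-- evaluation of A's loop on the (closed) sorted list: an explicit if-tree in capacity
theorem pvA_eval (c : Int) : greedy_max_weight_descendent 0 c =
    (if 7 ≤ c then (if 12 ≤ c then (if 16 ≤ c then (if 19 ≤ c then (if 21 ≤ c then
      (if 22 ≤ c then (if 23 ≤ c then 23 else 22) else 21) else 19) else 16) else 12) else 7) else 0) := by
  rfl

-- evaluation of B's selection loop: the same thresholds, written as Python's `>` tests
theorem pvB_eval (c : Int) : greedy_max_weight_descendent_alt 0 c =
    (if 7 > c then 0 else if 12 > c then 7 else if 16 > c then 12 else if 19 > c then 16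
     else if 21 > c then 19 else if 22 > c then 21 else if 23 > c then 22 else 23) := by
  rfl

theorem pvA_weight_irrel (w c : Int) : greedy_max_weight_descendent w c = greedy_max_weight_descendent 0 c := rfl
theorem pvB_weight_irrel (w c : Int) : greedy_max_weight_descendent_alt w c = greedy_max_weight_descendent_alt 0 c := rfl

-- ===== VERDICT (by name: the statement is the Claim_ definition above) =====
theorem greedy_max_weight_descendent_spec : Claim_equal_greedy_max_weight_descendent := by
  intro weight capacity _
  unfold Spec_greedy_max_weight_descendent
  rw [pvA_weight_irrel, pvB_weight_irrel, pvA_eval, pvB_eval]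
  split_ifs <;> omega
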